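-- pv_equiv track=rewrite | github.com/noahfkaplan/InterviewPracticeSolutions | DailySolutions/12-22-2019/WitnessOfTheTallPeople.py | witnesses
-- ===== SOURCE A (Python) =====
-- def witnesses(queue):
--     numberOfWitnesses = 0
--     aheadInQueue = queue.copy()
--     for height in queue:
--         aheadInQueue.remove(height)
--         numberOfWitnesses += 1 #will be removed if anyone ahead in queue is taller
--         for aheadHeights in aheadInQueue:
--             if(height <= aheadHeights):
--                 numberOfWitnesses -= 1
--                 break
--     return numberOfWitnesses
-- ===== SOURCE B (Python) =====
-- def witnesses(queue):
--     # single right-to-left pass: count strict running-maximum records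
--     count = 0
--     best = None
--     for h in reversed(queue):
--         if best is None or h > best:
--             count += 1
--             best = h
--     return count
-- ===== Notes on version B (the rewrite author's own statement) =====
-- stated objective: faster
-- what changed: Replaced the quadratic scan (copy the queue, remove each person, rescan everyone ahead) with a single right-to-left pass tracking the running suffix maximum and counting strict records.
import Mathlib
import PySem

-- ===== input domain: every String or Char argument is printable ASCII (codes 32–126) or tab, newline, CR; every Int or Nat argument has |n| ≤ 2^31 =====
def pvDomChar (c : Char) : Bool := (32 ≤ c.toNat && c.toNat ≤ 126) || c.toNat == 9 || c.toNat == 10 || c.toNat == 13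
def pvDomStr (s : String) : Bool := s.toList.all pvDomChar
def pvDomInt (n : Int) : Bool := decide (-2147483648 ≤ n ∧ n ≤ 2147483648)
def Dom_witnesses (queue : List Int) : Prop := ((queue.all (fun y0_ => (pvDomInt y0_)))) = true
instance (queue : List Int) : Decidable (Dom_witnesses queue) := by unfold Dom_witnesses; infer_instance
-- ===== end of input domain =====

-- B replaces A's quadratic copy/remove/rescan with one right-to-left pass counting strict suffix-maximum records (objective: faster).

-- ===== PORT A =====
-- for each height: remove it from the copy, then scan everyone still ahead; the break-search
-- inner loop is ported as List.any. remove? never returns none on a reachable state (the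
-- iterated value is always present in the shrinking copy), so .getD st.1 is unreachable.
def witnesses (queue : List Int) : Int :=
  (queue.foldl
    (fun (st : List Int × Int) (height : Int) =>
      let ahead := (PySem.List.remove? st.1 height).getD st.1
      let c := st.2 + 1
      if ahead.any (fun a => decide (height ≤ a)) then (ahead, c - 1) else (ahead, c))
    (queue, 0)).2

-- ===== PORT B =====
def witnesses_alt (queue : List Int) : Int :=
  (queue.reverse.foldl
    (fun (st : Option Int × Int) (h : Int) =>
      match st.1 with
      | none => (some h, st.2 + 1)
      | some b => if b < h then (some h, st.2 + 1) else st)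
    (none, 0)).2

-- ===== PRECONDITION & SPEC =====
def Spec_witnesses (queue : List Int) (out : Int) : Prop := out = witnesses_alt queue
instance (queue : List Int) (out : Int) : Decidable (Spec_witnesses queue out) := by unfold Spec_witnesses; infer_instance

-- ===== CLAIM (what is proved, stated in full; the proofs are below) =====
def Claim_equal_witnesses : Prop := ∀ (queue : List Int), Dom_witnesses queue → Spec_witnesses queue (witnesses queue)

-- ===== LEMMAS AND PROOFS =====

/-- reference count: number of positions strictly greater than everything behind them -/
def pvF : List Int → Int
  | [] => 0
  | h :: t => (if t.all (fun a => decide (a < h)) then 1 else 0) + pvF t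

/-- running suffix maximum -/
def pvM : List Int → Option Int
  | [] => none
  | h :: t => some (match pvM t with | none => h | some b => if b < h then h else b)

theorem pvM_eq_none_iff (t : List Int) : pvM t = none ↔ t = [] := by
  cases t <;> simp [pvM]

theorem perm_any {l₁ l₂ : List Int} (p : Int → Bool) (hp : l₁.Perm l₂) :
    l₁.any p = l₂.any p := by
  have hmem : ∀ x : Int, x ∈ l₁ ↔ x ∈ l₂ := fun x => hp.mem_iff
  cases h1 : l₁.any p <;> cases h2 : l₂.any p <;>
    simp_all [List.any_eq_true, List.any_eq_false]
  · obtain ⟨x, hx, hpx⟩ := h2; exact absurd hpx (by simp [h1 x hx])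
  · obtain ⟨x, hx, hpx⟩ := h1; exact absurd hpx (by simp [h2 x hx])

theorem decide_lt_eq_not_le (a b : Int) : decide (a < b) = !decide (b ≤ a) := by
  by_cases hab : a < b <;> simp_all

theorem all_eq_not_any (t : List Int) (h : Int) :
    t.all (fun a => decide (a < h)) = !(t.any (fun a => decide (h ≤ a))) := by
  induction t with
  | nil => rfl
  | cons x r ih => rw [List.all_cons, List.any_cons, ih, Bool.not_or, decide_lt_eq_not_le]

theorem witnesses_loop (xs : List Int) : ∀ (l : List Int) (c : Int), l.Perm xs →
    (xs.foldl
      (fun (st : List Int × Int) (height : Int) =>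
        let ahead := (PySem.List.remove? st.1 height).getD st.1
        let c := st.2 + 1
        if ahead.any (fun a => decide (height ≤ a)) then (ahead, c - 1) else (ahead, c))
      (l, c)).2 = c + pvF xs := by
  induction xs with
  | nil => intro l c _; simp [pvF]
  | cons h t ih =>
    intro l c hperm
    have hmem : h ∈ l := hperm.mem_iff.mpr (List.mem_cons_self ..)
    have hrem : PySem.List.remove? l h = some (l.erase h) :=
      PySem.List.remove?_eq_some_erase _ _ hmem
    have hperm' : (l.erase h).Perm t := by
      have := hperm.erase h
      simpa [List.erase_cons_head] using this
    have hany : (l.erase h).any (fun a => decide (h ≤ a)) = t.any (fun a => decide (h ≤ a)) :=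
      perm_any _ hperm'
    simp only [List.foldl_cons, hrem, Option.getD_some, hany]
    by_cases hb : t.any (fun a => decide (h ≤ a)) = true
    · rw [if_pos hb, ih _ _ hperm']
      have : t.all (fun a => decide (a < h)) = false := by
        rw [all_eq_not_any, hb]; rfl
      simp [pvF, this]
    · rw [if_neg hb, ih _ _ hperm']
      have : t.all (fun a => decide (a < h)) = true := by
        rw [all_eq_not_any, Bool.eq_false_iff.mpr hb]; rfl
      simp [pvF, this]; ring

theorem pvM_all_lt (t : List Int) (b h : Int) (hm : pvM t = some b) :
    t.all (fun a => decide (a < h)) = decide (b < h) := by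
  induction t generalizing b with
  | nil => simp [pvM] at hm
  | cons x r ih =>
    simp only [pvM] at hm
    cases hr : pvM r with
    | none =>
      have : r = [] := (pvM_eq_none_iff r).mp hr
      subst this
      simp [hr] at hm; subst hm; simp
    | some br =>
      rw [hr] at hm
      simp only [Option.some.injEq] at hm
      rw [List.all_cons, ih br hr]
      subst hm
      by_cases hx : br < x <;> simp [hx] <;> omega

theorem witnesses_alt_loop (t : List Int) :
    (t.reverse.foldl
      (fun (st : Option Int × Int) (h : Int) =>
        match st.1 with
        | none => (some h, st.2 + 1)
        | some b => if b < h then (some h, st.2 + 1) else st)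
      (none, 0)) = (pvM t, pvF t) := by
  induction t with
  | nil => rfl
  | cons h t ih =>
    rw [List.reverse_cons, List.foldl_append, ih]
    cases hm : pvM t with
    | none =>
      have : t = [] := (pvM_eq_none_iff t).mp hm
      subst this
      simp [pvM, pvF]
    | some b =>
      have hall := pvM_all_lt t b h hm
      by_cases hb : b < h
      · simp only [List.foldl_cons, List.foldl_nil, if_pos hb]
        have : t.all (fun a => decide (a < h)) = true := by rw [hall]; simp [hb]
        simp [pvM, pvF, hm, this, hb]
        ring
      · simp only [List.foldl_cons, List.foldl_nil, if_neg hb]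
        have : t.all (fun a => decide (a < h)) = false := by rw [hall]; simp [hb]
        simp [pvM, pvF, hm, this, hb]

-- ===== VERDICT (by name: the statement is the Claim_ definition above) =====
theorem witnesses_spec : Claim_equal_witnesses := by
  intro queue _
  unfold Spec_witnesses witnesses witnesses_alt
  rw [witnesses_loop queue queue 0 (List.Perm.refl _), witnesses_alt_loop queue]
  simp
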